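-- pv_equiv track=rewrite | github.com/Aser-Abdelfatah/Analysis-of-Airbnb-Rental-Prices-and-Customer-Satisfaction | Airbnb Data Analysis.py | num_listings
-- ===== SOURCE A (Python) =====
-- def num_listings(d):
--     """ takes as input the dictionary returned by host_listings and returns a list l
--     where l[i] is the number of hosts having i number of rooms
--
--     :param d: (dictionary) a dictionary mapping every host_id to the list of room_ids associated with that host
--     :return: (list) a list l where l[i] is the number of hosts having i number of rooms
--     """
--     l = []
--     # determines the largest number of rooms owned by the same host to put an endpoint to the list
--     largest_num = 0
--     for key in d.keys():
--         if len(d[key]) > largest_num: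
--             largest_num = len(d[key])
--
--     for i in range(largest_num + 1):
--         counter = 0
--         for key in d.keys():
--             # counts the number of hosts having i listings
--             if len(d[key]) == i:
--                 counter = counter + 1
--         # adds the number of hosts to the list
--         l.append(counter)
--
--     return l
-- ===== SOURCE B (Python) =====
-- def num_listings(d):
--     """ takes as input the dictionary returned by host_listings and returns a list l
--     where l[i] is the number of hosts having i number of rooms
--     """
--     sizes = [len(v) for v in d.values()]
--     largest = max(sizes, default=0)
--     cnt = {}
--     for s in sizes:
--         cnt[s] = cnt.get(s, 0) + 1
--     return [cnt.get(i, 0) for i in range(largest + 1)]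
-- ===== Notes on version B (the rewrite author's own statement) =====
-- stated objective: faster
-- what changed: Replaces A's rescan of the whole dict for every size 0..largest with one frequency dictionary built in a single pass over the sizes, then a direct lookup per index.
import Mathlib
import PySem

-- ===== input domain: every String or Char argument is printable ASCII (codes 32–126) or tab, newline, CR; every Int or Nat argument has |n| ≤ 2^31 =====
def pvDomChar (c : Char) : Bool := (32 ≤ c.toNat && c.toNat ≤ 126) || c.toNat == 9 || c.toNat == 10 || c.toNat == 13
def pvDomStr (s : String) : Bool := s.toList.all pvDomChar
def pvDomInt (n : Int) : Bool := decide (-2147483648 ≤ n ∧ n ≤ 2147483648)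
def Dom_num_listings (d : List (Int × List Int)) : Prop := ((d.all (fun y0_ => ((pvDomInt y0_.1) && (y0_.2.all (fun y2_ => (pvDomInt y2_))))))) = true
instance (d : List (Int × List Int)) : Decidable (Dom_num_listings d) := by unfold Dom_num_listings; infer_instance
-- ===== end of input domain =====

-- B replaces A's per-size rescan of the dict with one frequency dictionary built in a single pass.

-- ===== PORT A =====
-- literal port: the dict parameter is realised as PySem.Dict.ofList d; d[key] inside the loops
-- is ported as getD key [] (the key is drawn from d.keys(), so the lookup never fails)
def num_listings (d : List (Int × List Int)) : List Int :=
  let dd := PySem.Dict.ofList d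
  let largest := dd.keys.foldl
    (fun acc k => if ((dd.getD k []).length : Int) > acc then ((dd.getD k []).length : Int) else acc) 0
  (PySem.List.pyRange 0 (largest + 1) 1).foldl
    (fun l i =>
      l ++ [dd.keys.foldl (fun c k => if ((dd.getD k []).length : Int) = i then c + 1 else c) 0]) []

-- ===== PORT B =====
def num_listings_alt (d : List (Int × List Int)) : List Int :=
  let dd := PySem.Dict.ofList d
  let sizes := dd.values.map (fun v => (v.length : Int))
  let largest := PySem.List.maxD sizes (fun x => x) 0
  let cnt := sizes.foldl (fun c s => c.insert s (c.getD s 0 + 1)) PySem.Dict.empty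
  (PySem.List.pyRange 0 (largest + 1) 1).map (fun i => cnt.getD i 0)

-- ===== PRECONDITION & SPEC =====
def Spec_num_listings (d : List (Int × List Int)) (out : List Int) : Prop := out = num_listings_alt d
instance (d : List (Int × List Int)) (out : List Int) : Decidable (Spec_num_listings d out) := by unfold Spec_num_listings; infer_instance

-- ===== CLAIM (what is proved, stated in full; the proofs are below) =====
def Claim_equal_num_listings : Prop := ∀ (d : List (Int × List Int)), Dom_num_listings d → Spec_num_listings d (num_listings d)

-- ===== LEMMAS AND PROOFS =====

-- A's running-max loop over the sizes is the foldl of max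
theorem pv_largest_eq (xs : List Int) :
    xs.foldl (fun acc s => if s > acc then s else acc) 0 = xs.foldl max 0 := by
  apply PySem.List.foldl_congr_mem
  intro acc s _
  simp only [max_def]
  split_ifs <;> omega

-- B's max(sizes, default=0) equals the foldl of max when all elements are ≥ 0
theorem pv_maxD_eq (xs : List Int) (h : ∀ x ∈ xs, 0 ≤ x) :
    PySem.List.maxD xs (fun x => x) 0 = xs.foldl max 0 := by
  cases xs with
  | nil => rfl
  | cons x t =>
    have hx : max 0 x = x := by
      have := h x (by simp); omega
    simp [PySem.List.maxD, PySem.List.max?_id_cons, List.foldl_cons, hx]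

-- A's inner counting loop over a list counts occurrences
theorem pv_count_loop (xs : List Int) (i : Int) :
    xs.foldl (fun c s => if s = i then c + 1 else c) 0 = (xs.count i : Int) := by
  have := PySem.List.foldl_ite_add_one (p := fun s => s = i) (l := xs) (a := (0 : Int))
  simp only [this, List.count, zero_add]
  congr 1

-- ===== VERDICT (by name: the statement is the Claim_ definition above) =====
theorem num_listings_spec : Claim_equal_num_listings := by
  intro d _
  unfold Spec_num_listings num_listings num_listings_alt
  dsimp only
  set dd := PySem.Dict.ofList d with hdd
  have hnd : dd.keys.Nodup := PySem.Dict.nodup_keys_ofList d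
  -- the sizes seen by B are exactly the sizes A reads through the keys
  have hvals : dd.values = dd.keys.map (fun k => dd.getD k []) :=
    PySem.Dict.values_eq_map_keys dd hnd []
  set sizes : List Int := dd.keys.map (fun k => ((dd.getD k []).length : Int)) with hsizes
  have hs : dd.values.map (fun v => (v.length : Int)) = sizes := by
    rw [hvals, List.map_map]; rfl
  have hnonneg : ∀ x ∈ sizes, 0 ≤ x := by
    intro x hx
    rw [hsizes] at hx
    simp only [List.mem_map] at hx
    obtain ⟨k, _, rfl⟩ := hx
    exact Int.natCast_nonneg _
  -- the two "largest" computations agree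
  have hmaxA : dd.keys.foldl
      (fun acc k => if ((dd.getD k []).length : Int) > acc then ((dd.getD k []).length : Int) else acc) 0
      = sizes.foldl (fun acc s => if s > acc then s else acc) 0 := by
    rw [hsizes, List.foldl_map]
  have hmax : dd.keys.foldl
      (fun acc k => if ((dd.getD k []).length : Int) > acc then ((dd.getD k []).length : Int) else acc) 0
      = PySem.List.maxD (dd.values.map (fun v => (v.length : Int))) (fun x => x) 0 := by
    rw [hmaxA, pv_largest_eq, hs, pv_maxD_eq sizes hnonneg]
  rw [hs] at hmax
  rw [hs, ← hmax]
  -- A's appending loop is a map; each entry is the count, which B reads from its counter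
  rw [PySem.List.foldl_append_singleton_eq_map, List.nil_append]
  apply List.map_congr_left
  intro i _
  have hL : dd.keys.foldl (fun c k => if ((dd.getD k []).length : Int) = i then c + 1 else c) (0 : Int)
      = sizes.foldl (fun c s => if s = i then c + 1 else c) 0 := by
    rw [hsizes, List.foldl_map]
  refine hL.trans ?_
  rw [pv_count_loop, PySem.Dict.getD_foldl_insert_add_one]
  simp [pysem]
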